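-- pv_equiv track=rewrite | github.com/acmeism/RosettaCodeData | Task/Validate-International-Securities-Identification-Number/Python/validate-international-securities-identification-number.py | check_isin_alt
-- ===== SOURCE A (Python) =====
-- def check_isin_alt(a):
--     if len(a) != 12:
--         return False
--     s = []
--     for i, c in enumerate(a):
--         if c.isdigit():
--             if i < 2:
--                 return False
--             s.append(ord(c) - 48)
--         elif c.isupper():
--             if i == 11:
--                 return False
--             s += divmod(ord(c) - 55, 10)
--         else:
--             return False
--     v = sum(s[::-2])
--     for k in s[-2::-2]:
--         k = 2 * k
--         v += k - 9 if k > 9 else k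
--     return v % 10 == 0
-- ===== SOURCE B (Python) =====
-- def check_isin_alt(a):
--     if len(a) != 12:
--         return False
--     # Streaming Luhn with two accumulators: no digit list is built and nothing
--     # is reversed.  For each expanded value v at forward position n, `e` adds
--     # the doubled contribution when n is even (plain when odd), `o` the other
--     # way round; the correct total is chosen at the end by the parity of the
--     # expanded length.
--     e = o = n = 0
--     for i, c in enumerate(a):
--         if c.isdigit():
--             if i < 2:
--                 return False
--             vals = (ord(c) - 48,)
--         elif c.isupper():
--             if i == 11:
--                 return False
--             vals = divmod(ord(c) - 55, 10)
--         else: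
--             return False
--         for v in vals:
--             d = 2 * v
--             if d > 9:
--                 d -= 9
--             if n % 2 == 0:
--                 e += d
--                 o += v
--             else:
--                 e += v
--                 o += d
--             n += 1
--     return (e if n % 2 == 0 else o) % 10 == 0
-- ===== Notes on version B (the rewrite author's own statement) =====
-- stated objective: alternative
-- what changed: B replaces the materialised digit list and A's two parity slices (s[::-2], s[-2::-2]) with a streaming Luhn: a single forward pass that keeps two running checksums (doubling on even vs odd expanded positions) plus the expanded length, selecting the correct total by the final length's parity.
import Mathlib
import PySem

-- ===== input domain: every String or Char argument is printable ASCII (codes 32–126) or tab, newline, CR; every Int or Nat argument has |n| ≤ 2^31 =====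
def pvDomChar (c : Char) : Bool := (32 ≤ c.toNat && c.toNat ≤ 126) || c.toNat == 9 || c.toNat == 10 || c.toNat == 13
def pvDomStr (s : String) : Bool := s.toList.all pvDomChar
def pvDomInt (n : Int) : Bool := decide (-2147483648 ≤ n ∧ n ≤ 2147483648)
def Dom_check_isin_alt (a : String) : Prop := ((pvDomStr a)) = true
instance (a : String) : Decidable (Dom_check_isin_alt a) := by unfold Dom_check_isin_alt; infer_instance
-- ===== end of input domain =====

-- B is a streaming Luhn: it never builds the expanded digit list and reverses nothing —
-- one forward pass keeps two running checksums (doubling on even vs on odd expanded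
-- positions) and the final expanded-length parity selects the right one (objective:
-- alternative algorithm, same cost).

-- ===== PORT A =====
-- the enumerate loop of A: builds s, 'none' = early 'return False'
def pvGoA : List (Int × Char) → List Int → Option (List Int)
  | [], s => some s
  | (i, c) :: rest, s =>
    if PySem.Chars.isdigit c then
      if i < 2 then none
      else pvGoA rest (s ++ [(c.toNat : Int) - 48])
    else if PySem.Chars.isupper c then
      if i == 11 then none
      else pvGoA rest (s ++ [PySem.Int.floordiv ((c.toNat : Int) - 55) 10,
                             PySem.Int.mod ((c.toNat : Int) - 55) 10])
    else none

def check_isin_alt (a : String) : Bool :=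
  if PySem.Str.len a ≠ 12 then false
  else
    match pvGoA (PySem.List.enumerate a.toList 0) [] with
    | none => false
    | some s =>
      let v := ((PySem.List.slice? s none none (-2)).getD []).sum
      let v := ((PySem.List.slice? s (some (-2)) none (-2)).getD []).foldl
        (fun v k => v + (if 2 * k > 9 then 2 * k - 9 else 2 * k)) v
      PySem.Int.mod v 10 == 0

-- ===== PORT B =====
-- the inner 'for v in vals' loop of B: state (e, o, n)
def pvFeed : List Int → Int × Int × Int → Int × Int × Int
  | [], st => st
  | v :: rest, (e, o, n) =>
    let d0 := 2 * v
    let d := if d0 > 9 then d0 - 9 else d0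
    if PySem.Int.mod n 2 == 0 then pvFeed rest (e + d, o + v, n + 1)
    else pvFeed rest (e + v, o + d, n + 1)

-- the enumerate loop of B: 'none' = early 'return False'
def pvGoB : List (Int × Char) → Int × Int × Int → Option (Int × Int × Int)
  | [], st => some st
  | (i, c) :: rest, st =>
    if PySem.Chars.isdigit c then
      if i < 2 then none
      else pvGoB rest (pvFeed [(c.toNat : Int) - 48] st)
    else if PySem.Chars.isupper c then
      if i == 11 then none
      else pvGoB rest (pvFeed [PySem.Int.floordiv ((c.toNat : Int) - 55) 10,
                               PySem.Int.mod ((c.toNat : Int) - 55) 10] st)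
    else none

def check_isin_alt_alt (a : String) : Bool :=
  if PySem.Str.len a ≠ 12 then false
  else
    match pvGoB (PySem.List.enumerate a.toList 0) (0, 0, 0) with
    | none => false
    | some (e, o, n) =>
      PySem.Int.mod (if PySem.Int.mod n 2 == 0 then e else o) 10 == 0

-- ===== PRECONDITION & SPEC =====
def Spec_check_isin_alt (a : String) (out : Bool) : Prop := out = check_isin_alt_alt a
instance (a : String) (out : Bool) : Decidable (Spec_check_isin_alt a out) := by unfold Spec_check_isin_alt; infer_instance

-- ===== CLAIM (what is proved, stated in full; the proofs are below) =====
def Claim_equal_check_isin_alt : Prop := ∀ (a : String), Dom_check_isin_alt a → Spec_check_isin_alt a (check_isin_alt a)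

-- ===== LEMMAS AND PROOFS =====

-- one char's contribution to the expanded digit sequence (when it passes A's guards)
def pvBlock (c : Char) : List Int :=
  if PySem.Chars.isdigit c then [(c.toNat : Int) - 48]
  else [PySem.Int.floordiv ((c.toNat : Int) - 55) 10, PySem.Int.mod ((c.toNat : Int) - 55) 10]

-- A's guards, as a predicate over the suffix starting at index i
def pvValidFrom : List Char → Int → Bool
  | [], _ => true
  | c :: rest, i =>
    (if PySem.Chars.isdigit c then decide (¬ i < 2)
     else if PySem.Chars.isupper c then i != 11
     else false) && pvValidFrom rest (i + 1)

-- pvDecim true l = elements of l at even positions, pvDecim false l = at odd positions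
def pvDecim : Bool → List Int → List Int
  | _, [] => []
  | true, x :: r => x :: pvDecim false r
  | false, _ :: r => pvDecim true r

def pvLuhn2 (v : Int) : Int := if 2 * v > 9 then 2 * v - 9 else 2 * v

-- doubled at positions whose evenness equals b
def pvDual : List Int → Bool → Int
  | [], _ => 0
  | v :: r, b => (if b then pvLuhn2 v else v) + pvDual r (!b)

theorem pvGoA_eq (cs : List Char) : ∀ (i : Int) (s : List Int),
    pvGoA (PySem.List.enumerate cs i) s =
      if pvValidFrom cs i then some (s ++ cs.flatMap pvBlock) else none := by
  induction cs with
  | nil => intro i s; simp [PySem.List.enumerate, pvGoA, pvValidFrom]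
  | cons c rest ih =>
    intro i s
    rw [PySem.List.enumerate_cons]
    by_cases hd : PySem.Chars.isdigit c = true
    · by_cases hi : i < 2
      · simp [pvGoA, hd, hi, pvValidFrom]
      · simp [pvGoA, hd, hi, pvValidFrom, pvBlock, ih]
    · by_cases hu : PySem.Chars.isupper c = true
      · by_cases hi : i = 11
        · simp [pvGoA, hd, hu, hi, pvValidFrom]
        · simp [pvGoA, hd, hu, hi, pvValidFrom, pvBlock, ih]
      · simp [pvGoA, hd, hu, pvValidFrom]

theorem pvFeed_append (l1 l2 : List Int) (st : Int × Int × Int) :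
    pvFeed (l1 ++ l2) st = pvFeed l2 (pvFeed l1 st) := by
  induction l1 generalizing st with
  | nil => rfl
  | cons v r ih =>
    obtain ⟨e, o, n⟩ := st
    simp only [List.cons_append, pvFeed]
    split <;> exact ih _

theorem pvFeed_cons (x : Int) (l : List Int) (st : Int × Int × Int) :
    pvFeed l (pvFeed [x] st) = pvFeed (x :: l) st := (pvFeed_append [x] l st).symm

theorem pvFeed_cons2 (x y : Int) (l : List Int) (st : Int × Int × Int) :
    pvFeed l (pvFeed [x, y] st) = pvFeed (x :: y :: l) st := (pvFeed_append [x, y] l st).symm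

theorem pvGoB_eq (cs : List Char) : ∀ (i : Int) (st : Int × Int × Int),
    pvGoB (PySem.List.enumerate cs i) st =
      if pvValidFrom cs i then some (pvFeed (cs.flatMap pvBlock) st) else none := by
  induction cs with
  | nil => intro i st; simp [PySem.List.enumerate, pvGoB, pvValidFrom, pvFeed]
  | cons c rest ih =>
    intro i st
    rw [PySem.List.enumerate_cons]
    by_cases hd : PySem.Chars.isdigit c = true
    · by_cases hi : i < 2
      · simp [pvGoB, hd, hi, pvValidFrom]
      · simp [pvGoB, hd, hi, pvValidFrom, pvBlock, ih, pvFeed_cons]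
    · by_cases hu : PySem.Chars.isupper c = true
      · by_cases hi : i = 11
        · simp [pvGoB, hd, hu, hi, pvValidFrom]
        · simp [pvGoB, hd, hu, hi, pvValidFrom, pvBlock, ih, pvFeed_cons2]
      · simp [pvGoB, hd, hu, pvValidFrom]

theorem pv_evens_concat (t : List Int) (x : Int) :
    (PySem.List.slice? (t ++ [x]) none none (-2)).getD [] =
      x :: (PySem.List.slice? t (some (-2)) none (-2)).getD [] := by
  simp only [PySem.List.slice?, PySem.List.sliceIndices]
  norm_num
  by_cases hn : 2 ≤ t.length
  · rw [if_pos (by omega : (-1:Int) < ↑t.length), if_pos (by omega : 1 < t.length)]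
    have hc1 : (((t.length:Int) + 1 + 2 - 1) / 2).toNat = t.length / 2 + 1 := by omega
    have hc2 : ((max (-2 + (t.length:Int)) (-1) + 1 + 2 - 1) / 2).toNat = t.length / 2 := by omega
    rw [hc1, hc2, List.range_succ_eq_map, List.map_cons, List.map_map]
    congr 1
    · have e0 : (((t.length:Int)) + -(2 * ((0:Nat):Int))).toNat = t.length := by push_cast; omega
      rw [getElem_congr rfl e0 (by simp)]
      simp
    · rw [← List.filterMap_eq_map]
      apply List.filterMap_congr
      intro k hk
      simp only [List.mem_range] at hk
      have hj : (max (-2 + (t.length:Int)) (-1) + -(2 * (k:Int))).toNat < t.length := by omega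
      rw [List.getElem?_eq_getElem hj]
      show some _ = some _
      congr 1
      simp only [Function.comp_apply]
      have hlt : ((t.length:Int) + -(2 * ((Nat.succ k : Nat):Int))).toNat < t.length := by
        push_cast; omega
      have hi : ((t.length:Int) + -(2 * ((Nat.succ k : Nat):Int))).toNat
          = (max (-2 + (t.length:Int)) (-1) + -(2 * (k:Int))).toNat := by push_cast; omega
      rw [List.getElem_append_left hlt]
      exact getElem_congr rfl hi hlt
  · rcases t with _ | ⟨a, t'⟩
    · norm_num
    · rcases t' with _ | ⟨b, t''⟩
      · norm_num
      · simp at hn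

theorem pv_odds_concat (t : List Int) (x : Int) :
    (PySem.List.slice? (t ++ [x]) (some (-2)) none (-2)).getD [] =
      (PySem.List.slice? t none none (-2)).getD [] := by
  simp only [PySem.List.slice?, PySem.List.sliceIndices]
  norm_num
  by_cases h0 : 0 < t.length
  · rw [if_pos h0, if_pos h0]
    have hc : ((-2 + ((t.length:Int) + 1) + 1 + 2 - 1) / 2).toNat
        = (((t.length:Int) + 2 - 1) / 2).toNat := by omega
    rw [hc]
    apply List.filterMap_congr
    intro k hk
    simp only [List.mem_range] at hk
    have hidx : (-2 + ((t.length:Int) + 1) + -(2 * (k:Int))).toNat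
        = ((t.length:Int) - 1 + -(2 * (k:Int))).toNat := by omega
    rw [hidx, List.getElem?_append_left (by omega)]
  · rw [if_neg h0, if_neg h0]
    simp

theorem pv_slices_eq_decim (s : List Int) :
    (PySem.List.slice? s none none (-2)).getD [] = pvDecim true s.reverse ∧
    (PySem.List.slice? s (some (-2)) none (-2)).getD [] = pvDecim false s.reverse := by
  induction s using List.reverseRecOn with
  | nil => constructor <;> decide
  | append_singleton t x ih =>
    constructor
    · rw [pv_evens_concat, List.reverse_append]
      simp [pvDecim, ih.2]
    · rw [pv_odds_concat, List.reverse_append]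
      simp [pvDecim, ih.1]

-- A's checksum fold is an affine sum
theorem pv_foldl_sum (l : List Int) (init : Int) :
    l.foldl (fun v k => v + (if 2 * k > 9 then 2 * k - 9 else 2 * k)) init
      = init + (l.map pvLuhn2).sum := by
  induction l generalizing init with
  | nil => simp
  | cons k r ih => simp [ih, pvLuhn2]; ring

theorem pvFeed_eq (s : List Int) : ∀ (e o n : Int), 0 ≤ n →
    pvFeed s (e, o, n) =
      (e + pvDual s (PySem.Int.mod n 2 == 0),
       o + pvDual s (!(PySem.Int.mod n 2 == 0)),
       n + s.length) := by
  induction s with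
  | nil => intro e o n _; simp [pvFeed, pvDual]
  | cons v r ih =>
    intro e o n hn
    have hflip : (PySem.Int.mod (n + 1) 2 == 0) = !(PySem.Int.mod n 2 == 0) := by
      rw [PySem.Int.mod_eq_emod_of_pos (by omega), PySem.Int.mod_eq_emod_of_pos (by omega)]
      rcases Int.emod_two_eq_zero_or_one n with h | h <;> simp [Int.add_emod, h]
    have hd : (if 2 * v > 9 then 2 * v - 9 else 2 * v) = pvLuhn2 v := rfl
    by_cases hp : (PySem.Int.mod n 2 == 0) = true
    · have h1 : pvFeed (v :: r) (e, o, n) = pvFeed r (e + pvLuhn2 v, o + v, n + 1) := by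
        simp only [pvFeed, hd, hp]; rfl
      rw [h1, ih _ _ _ (by omega), hflip, hp]
      simp only [pvDual, List.length_cons, Prod.mk.injEq, Bool.not_true]
      refine ⟨by simp; ring, by simp; ring, by push_cast; ring⟩
    · have hp' : (PySem.Int.mod n 2 == 0) = false := by simpa using hp
      have h1 : pvFeed (v :: r) (e, o, n) = pvFeed r (e + v, o + pvLuhn2 v, n + 1) := by
        simp only [pvFeed, hd, hp']; rfl
      rw [h1, ih _ _ _ (by omega), hflip, hp']
      simp only [pvDual, List.length_cons, Prod.mk.injEq, Bool.not_false]
      refine ⟨by simp; ring, by simp; ring, by push_cast; ring⟩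

theorem pvDual_append (t : List Int) (x : Int) : ∀ (b : Bool),
    pvDual (t ++ [x]) b = pvDual t b + (if b = decide (t.length % 2 = 0) then pvLuhn2 x else x) := by
  induction t with
  | nil => intro b; cases b <;> simp [pvDual]
  | cons v r ih =>
    intro b
    simp only [List.cons_append, pvDual, ih, List.length_cons]
    have : (decide (r.length % 2 = 0) : Bool) = !decide ((r.length + 1) % 2 = 0) := by
      rcases Nat.even_or_odd r.length with h | h <;> simp [Nat.even_iff, Nat.odd_iff] at h <;>
        simp [h, Nat.add_mod]
    rw [this]
    cases b <;> simp <;> ring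

-- the parity-selected dual sum equals A's decimated checksum
theorem pvDual_eq_decim (s : List Int) :
    (pvDual s (decide (s.length % 2 = 0))
        = (pvDecim true s.reverse).sum + ((pvDecim false s.reverse).map pvLuhn2).sum) ∧
    (pvDual s (!decide (s.length % 2 = 0))
        = ((pvDecim true s.reverse).map pvLuhn2).sum + (pvDecim false s.reverse).sum) := by
  induction s using List.reverseRecOn with
  | nil => constructor <;> decide
  | append_singleton t x ih =>
    have hL : (t ++ [x]).length = t.length + 1 := by simp
    have hpar : (decide ((t.length + 1) % 2 = 0) : Bool) = !decide (t.length % 2 = 0) := by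
      rcases Nat.even_or_odd t.length with h | h <;> simp [Nat.even_iff, Nat.odd_iff] at h <;>
        simp [h, Nat.add_mod]
    rw [List.reverse_append]
    constructor
    · rw [pvDual_append, hL, hpar]
      rw [if_neg (by cases h : decide (t.length % 2 = 0) <;> simp)]
      simp [pvDecim, ih.2]
      ring
    · rw [pvDual_append, hL, hpar, Bool.not_not]
      rw [if_pos rfl]
      simp [pvDecim, ih.1]
      ring

-- ===== VERDICT (by name: the statement is the Claim_ definition above) =====
theorem check_isin_alt_spec : Claim_equal_check_isin_alt := by
  intro a _
  unfold Spec_check_isin_alt check_isin_alt check_isin_alt_alt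
  by_cases hl : PySem.Str.len a = 12
  · rw [if_neg (fun h => h hl), if_neg (fun h => h hl), pvGoA_eq, pvGoB_eq]
    by_cases hv : pvValidFrom a.toList 0
    · rw [if_pos hv, if_pos hv]
      set s := a.toList.flatMap pvBlock with hs
      rw [pvFeed_eq s 0 0 0 le_rfl]
      simp only [List.nil_append, zero_add]
      have h0 : (PySem.Int.mod 0 2 == 0) = true := by decide
      rw [h0]
      have hn : (PySem.Int.mod ((s.length : Int)) 2 == 0)
          = decide (s.length % 2 = 0) := by
        rw [PySem.Int.mod_eq_emod_of_pos (by omega)]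
        by_cases h : s.length % 2 = 0
        · simp only [h, decide_true, beq_iff_eq]; omega
        · simp only [h, decide_false, beq_eq_false_iff_ne, ne_eq]; omega
      rw [hn]
      rw [pv_foldl_sum, (pv_slices_eq_decim s).1, (pv_slices_eq_decim s).2]
      by_cases hp : s.length % 2 = 0
      · rw [if_pos (by simp [hp])]
        have h1 := (pvDual_eq_decim s).1
        rw [(by simp [hp] : (decide (s.length % 2 = 0)) = true)] at h1
        rw [h1]
      · rw [if_neg (by simp [hp])]
        have h1 := (pvDual_eq_decim s).1
        rw [(by simp [hp] : (decide (s.length % 2 = 0)) = false)] at h1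
        simp only [Bool.not_true]
        rw [h1]
    · rw [if_neg hv, if_neg hv]
  · rw [if_pos hl, if_pos hl]
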